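-- pv_equiv track=rewrite | github.com/ftgTUGraz/Chat2Scenario | scenario_mining/rounD_scenario_mining/playground2_23.py | determine_activity_type
-- ===== SOURCE A (Python) =====
-- def determine_activity_type(lane_sequence):
--     if len(lane_sequence) < 2:
--         return None
--
--     lane_id_start = lane_sequence[0]
--     lane_id_end = lane_sequence[-1]
--
--     if (lane_id_start in [2, 3] and lane_id_end == 11) or \
--        (lane_id_start in [4, 5] and lane_id_end == 12) or \
--        (lane_id_start in [6, 7] and lane_id_end == 13) or \
--        (lane_id_start in [8, 9] and lane_id_end == 10):
--         return "turn right"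
--     elif (lane_id_start in [2, 3] and lane_id_end == 12) or \
--          (lane_id_start in [4, 5] and lane_id_end == 13) or \
--          (lane_id_start in [6, 7] and lane_id_end == 10) or \
--          (lane_id_start in [8, 9] and lane_id_end == 11):
--         return "go straight"
--     elif (lane_id_start in [2, 3] and lane_id_end == 13) or \
--          (lane_id_start in [4, 5] and lane_id_end == 10) or \
--          (lane_id_start in [6, 7] and lane_id_end == 11) or \
--          (lane_id_start in [8, 9] and lane_id_end == 12):
--         return "turn left"
--     elif (lane_id_start in [2, 3] and lane_id_end == 10) or \
--          (lane_id_start in [4, 5] and lane_id_end == 11) or \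
--          (lane_id_start in [6, 7] and lane_id_end == 12) or \
--          (lane_id_start in [8, 9] and lane_id_end == 13):
--         return "U-turn"
--     elif any(lane in lane_sequence for lane in [14, 15, 16, 17]):
--         return "turn right"
--     return None
-- ===== SOURCE B (Python) =====
-- # Single left-to-right pass: accumulate (last lane, seen-ramp flag, count) in one fold,
-- # then classify via a rotated exit ring instead of a case table.
-- _EXIT_RING = [10, 11, 12, 13]
-- _LABELS = ["U-turn", "turn right", "go straight", "turn left"]
-- _RAMPS = (14, 15, 16, 17)
--
--
-- def determine_activity_type(lane_sequence):
--     it = iter(lane_sequence)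
--     try:
--         first = next(it)
--     except StopIteration:
--         return None
--     last = first
--     seen_ramp = first in _RAMPS
--     count = 1
--     for lane in it:
--         last = lane
--         count += 1
--         if lane in _RAMPS:
--             seen_ramp = True
--     if count < 2:
--         return None
--     if 2 <= first <= 9 and 10 <= last <= 13:
--         g = (first - 2) // 2
--         ring = _EXIT_RING[g:] + _EXIT_RING[:g]
--         return _LABELS[ring.index(last)]
--     return "turn right" if seen_ramp else None
-- ===== Notes on version B (the rewrite author's own statement) =====
-- stated objective: alternative
-- what changed: Replaced A's double indexing plus four separate membership scans and a sixteen-disjunct if/elif chain by one left-to-right fold accumulating (last lane, ramp-seen flag, count), classifying via a rotated exit-ring list and ring.index instead of the case table.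
import Mathlib
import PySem

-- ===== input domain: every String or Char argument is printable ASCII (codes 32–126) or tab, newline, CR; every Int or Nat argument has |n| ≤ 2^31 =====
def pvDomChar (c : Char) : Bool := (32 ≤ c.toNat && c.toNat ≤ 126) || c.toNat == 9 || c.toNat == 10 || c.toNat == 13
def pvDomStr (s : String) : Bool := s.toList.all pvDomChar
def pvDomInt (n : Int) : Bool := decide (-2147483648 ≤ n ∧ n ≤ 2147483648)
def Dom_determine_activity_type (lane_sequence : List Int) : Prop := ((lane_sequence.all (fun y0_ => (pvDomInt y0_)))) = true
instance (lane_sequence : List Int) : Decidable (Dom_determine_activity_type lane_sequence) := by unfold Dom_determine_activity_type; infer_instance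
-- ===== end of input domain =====

-- B does one left-to-right fold accumulating (last lane, ramp-seen flag, count) and classifies
-- via a rotated exit-ring list with index, instead of A's indexing + case chain + four scans
-- (objective: alternative).


-- ===== PORT A =====
def determine_activity_type (lane_sequence : List Int) : Option String :=
  if lane_sequence.length < 2 then none
  else
    let s := (PySem.List.pyGet? lane_sequence 0).getD 0   -- getD unreachable: length ≥ 2
    let e := (PySem.List.pyGet? lane_sequence (-1)).getD 0
    if (([2,3] : List Int).contains s && e == 11) || (([4,5] : List Int).contains s && e == 12) ||
       (([6,7] : List Int).contains s && e == 13) || (([8,9] : List Int).contains s && e == 10) then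
      some "turn right"
    else if (([2,3] : List Int).contains s && e == 12) || (([4,5] : List Int).contains s && e == 13) ||
            (([6,7] : List Int).contains s && e == 10) || (([8,9] : List Int).contains s && e == 11) then
      some "go straight"
    else if (([2,3] : List Int).contains s && e == 13) || (([4,5] : List Int).contains s && e == 10) ||
            (([6,7] : List Int).contains s && e == 11) || (([8,9] : List Int).contains s && e == 12) then
      some "turn left"
    else if (([2,3] : List Int).contains s && e == 10) || (([4,5] : List Int).contains s && e == 11) ||
            (([6,7] : List Int).contains s && e == 12) || (([8,9] : List Int).contains s && e == 13) then
      some "U-turn"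
    else if (([14,15,16,17] : List Int).any (fun l => lane_sequence.contains l)) then
      some "turn right"
    else none

-- ===== PORT B =====
def pvRamps : List Int := [14, 15, 16, 17]
def pvExitRing : List Int := [10, 11, 12, 13]
def pvLabels : List String := ["U-turn", "turn right", "go straight", "turn left"]

-- the for-loop over the iterator: one fold updating (last, seen_ramp, count)
def pvStep (st : Int × Bool × Int) (lane : Int) : Int × Bool × Int :=
  (lane, st.2.1 || pvRamps.contains lane, st.2.2 + 1)

def determine_activity_type_alt (lane_sequence : List Int) : Option String :=
  match lane_sequence with
  | [] => none                                  -- StopIteration on the first next()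
  | first :: rest =>
    let st := rest.foldl pvStep (first, pvRamps.contains first, 1)
    let last := st.1
    let seen_ramp := st.2.1
    let count := st.2.2
    if count < 2 then none
    else if 2 ≤ first ∧ first ≤ 9 ∧ 10 ≤ last ∧ last ≤ 13 then
      let g := PySem.Int.floordiv (first - 2) 2
      let ring := PySem.List.slice pvExitRing (some g) none ++ PySem.List.slice pvExitRing none (some g)
      match PySem.List.index? ring last with
      | some i => PySem.List.pyGet? pvLabels (i : Int)   -- both unreachable 'none's = Python's ValueError/IndexError, never hit here
      | none => none
    else if seen_ramp then some "turn right" else none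

-- ===== PRECONDITION & SPEC =====
def Spec_determine_activity_type (lane_sequence : List Int) (out : Option String) : Prop := out = determine_activity_type_alt lane_sequence
instance (lane_sequence : List Int) (out : Option String) : Decidable (Spec_determine_activity_type lane_sequence out) := by unfold Spec_determine_activity_type; infer_instance

-- ===== CLAIM (what is proved, stated in full; the proofs are below) =====
def Claim_equal_determine_activity_type : Prop := ∀ (lane_sequence : List Int), Dom_determine_activity_type lane_sequence → Spec_determine_activity_type lane_sequence (determine_activity_type lane_sequence)

-- ===== LEMMAS AND PROOFS =====

-- characterise B's fold: it computes (last element, ramp flag, running count)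
lemma fold_char (rest : List Int) (a : Int) (r : Bool) (n : Int) :
    rest.foldl pvStep (a, r, n) =
      ((a :: rest).getLast (by simp), r || rest.any (fun l => pvRamps.contains l), n + rest.length) := by
  induction rest generalizing a r n with
  | nil => simp
  | cons b bs ih =>
    simp only [List.foldl_cons, pvStep, ih]
    refine congrArg₂ _ ?_ (congrArg₂ _ ?_ ?_)
    · simp [List.getLast_cons]
    · simp [Bool.or_assoc]
    · simp; omega

-- A's ramp scan over the whole list equals B's accumulated flag
lemma any_contains_comm (ys xs : List Int) :
    ys.any (fun l => xs.contains l) = xs.any (fun l => ys.contains l) := by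
  rw [Bool.eq_iff_iff]
  simp only [List.any_eq_true, List.contains_eq_mem, decide_eq_true_eq]
  exact ⟨fun ⟨y, hy, hx⟩ => ⟨_, hx, hy⟩, fun ⟨x, hx, hy⟩ => ⟨_, hy, hx⟩⟩

lemma ramp_eq (first : Int) (rest : List Int) :
    (pvRamps.any (fun l => (first :: rest).contains l)) =
      (pvRamps.contains first || rest.any (fun l => pvRamps.contains l)) := by
  rw [any_contains_comm, List.any_cons]

-- the pure decision core agrees for every start s, end e and ramp flag m
lemma decision_eq (s e : Int) (m : Bool) :
    (if (([2,3] : List Int).contains s && e == 11) || (([4,5] : List Int).contains s && e == 12) ||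
        (([6,7] : List Int).contains s && e == 13) || (([8,9] : List Int).contains s && e == 10) then
       some "turn right"
     else if (([2,3] : List Int).contains s && e == 12) || (([4,5] : List Int).contains s && e == 13) ||
             (([6,7] : List Int).contains s && e == 10) || (([8,9] : List Int).contains s && e == 11) then
       some "go straight"
     else if (([2,3] : List Int).contains s && e == 13) || (([4,5] : List Int).contains s && e == 10) ||
             (([6,7] : List Int).contains s && e == 11) || (([8,9] : List Int).contains s && e == 12) then
       some "turn left"
     else if (([2,3] : List Int).contains s && e == 10) || (([4,5] : List Int).contains s && e == 11) ||
             (([6,7] : List Int).contains s && e == 12) || (([8,9] : List Int).contains s && e == 13) then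
       some "U-turn"
     else if m then some "turn right" else (none : Option String)) =
    (if 2 ≤ s ∧ s ≤ 9 ∧ 10 ≤ e ∧ e ≤ 13 then
       let g := PySem.Int.floordiv (s - 2) 2
       let ring := PySem.List.slice pvExitRing (some g) none ++ PySem.List.slice pvExitRing none (some g)
       match PySem.List.index? ring e with
       | some i => PySem.List.pyGet? pvLabels (i : Int)
       | none => none
     else if m then some "turn right" else none) := by
  by_cases h1 : 2 ≤ s ∧ s ≤ 9
  · by_cases h2 : 10 ≤ e ∧ e ≤ 13
    · obtain ⟨hs1, hs2⟩ := h1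
      obtain ⟨he1, he2⟩ := h2
      interval_cases s <;> interval_cases e <;> cases m <;> decide
    · have c1 : ¬ (e = 10) := by omega
      have c2 : ¬ (e = 11) := by omega
      have c3 : ¬ (e = 12) := by omega
      have c4 : ¬ (e = 13) := by omega
      have hb : ¬ (2 ≤ s ∧ s ≤ 9 ∧ 10 ≤ e ∧ e ≤ 13) := by omega
      simp [c1, c2, c3, c4, hb]
  · have c2 : ¬ (s = 2) := by omega
    have c3 : ¬ (s = 3) := by omega
    have c4 : ¬ (s = 4) := by omega
    have c5 : ¬ (s = 5) := by omega
    have c6 : ¬ (s = 6) := by omega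
    have c7 : ¬ (s = 7) := by omega
    have c8 : ¬ (s = 8) := by omega
    have c9 : ¬ (s = 9) := by omega
    have hb : ¬ (2 ≤ s ∧ s ≤ 9 ∧ 10 ≤ e ∧ e ≤ 13) := by omega
    simp [c2, c3, c4, c5, c6, c7, c8, c9, hb]

-- ===== VERDICT (by name: the statement is the Claim_ definition above) =====
theorem determine_activity_type_spec : Claim_equal_determine_activity_type := by
  intro xs _
  match xs with
  | [] => decide
  | [a] =>
    simp [Spec_determine_activity_type, determine_activity_type, determine_activity_type_alt]
  | a :: b :: rs =>
    simp only [Spec_determine_activity_type, determine_activity_type, determine_activity_type_alt]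
    rw [fold_char]
    have hlen : ¬ ((a :: b :: rs).length < 2) := by simp
    have hcnt : ¬ ((1 : Int) + ((b :: rs).length : Int) < 2) := by
      simp only [List.length_cons]
      push_cast
      omega
    rw [if_neg hlen, if_neg hcnt]
    have hs : (PySem.List.pyGet? (a :: b :: rs) 0).getD 0 = a := by
      simp [PySem.List.pyGet?_zero_cons]
    have he : (PySem.List.pyGet? (a :: b :: rs) (-1)).getD 0 =
        ((a :: b :: rs).getLast (by simp)) := by
      rw [PySem.List.pyGet?_neg_one, List.getLast?_eq_some_getLast (by simp)]
      rfl
    rw [hs, he, ← ramp_eq]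
    exact decision_eq _ _ _
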